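-- pv_equiv track=rewrite | github.com/charsyam/redis-tools | show_redis_clients.py | get_client_ips
-- ===== SOURCE A (Python) =====
-- def get_client_ips(clients):
--     ips = {}
--     for client in clients:
--         addr = client['addr']
--         ip = addr.split(':')[0]
--         if ip in ips:
--             ips[ip] += 1
--         else:
--             ips[ip] = 1
--
--     return ips
-- ===== SOURCE B (Python) =====
-- def get_client_ips(clients):
--     ips = [client['addr'].split(':')[0] for client in clients]
--     pairs = []
--     while ips:
--         head = ips[0]
--         rest = [ip for ip in ips if ip != head]
--         pairs.append((head, len(ips) - len(rest)))
--         ips = rest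
--     return dict(pairs)
-- ===== Notes on version B (the rewrite author's own statement) =====
-- stated objective: alternative
-- what changed: Replaces the single-pass hash-counter loop with partition refinement: repeatedly take the first remaining IP, split the worklist into its occurrences and the rest, record (ip, removed count) as a length difference, and continue on the shrunken rest; the dict is built once at the end from the pair list.
import Mathlib
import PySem

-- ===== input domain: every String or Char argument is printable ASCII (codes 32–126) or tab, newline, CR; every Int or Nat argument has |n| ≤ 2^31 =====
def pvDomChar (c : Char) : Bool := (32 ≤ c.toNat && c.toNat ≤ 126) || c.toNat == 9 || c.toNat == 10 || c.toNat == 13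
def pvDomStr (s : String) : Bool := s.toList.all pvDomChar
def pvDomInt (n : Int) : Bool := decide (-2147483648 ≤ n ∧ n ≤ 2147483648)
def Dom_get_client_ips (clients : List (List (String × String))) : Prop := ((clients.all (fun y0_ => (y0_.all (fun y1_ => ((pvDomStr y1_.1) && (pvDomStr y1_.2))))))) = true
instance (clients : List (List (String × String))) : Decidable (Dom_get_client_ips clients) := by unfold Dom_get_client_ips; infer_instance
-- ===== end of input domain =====

-- B replaces A's single-pass hash-counter loop by partition refinement (strip all occurrences of the first remaining IP each round); same results, alternative decomposition.


-- ===== PORT A =====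
-- shared helper: client['addr'].split(':')[0]  (getD "" is only reached outside Pre_)
def pvIp (client : List (String × String)) : String :=
  PySem.List.pyGetD ((PySem.Str.split? ((PySem.Dict.mk client).getD "addr" "") ":").getD []) 0 ""

def get_client_ips (clients : List (List (String × String))) : List (String × Int) :=
  (clients.foldl (fun ips client =>
      let ip := pvIp client
      if ips.contains ip then ips.insert ip (ips.getD ip 0 + 1)
      else ips.insert ip 1) PySem.Dict.empty).items

-- ===== PORT B =====
-- the while loop of Source B: strip all occurrences of the first remaining IP, append (ip, removed count)
def tallyLoop (xs : List String) (pairs : List (String × Int)) : List (String × Int) :=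
  match xs with
  | [] => pairs
  | a :: t =>
    let rest := (a :: t).filter (fun x => x != a)
    tallyLoop rest (pairs ++ [(a, ((a :: t).length : Int) - rest.length)])
termination_by xs.length
decreasing_by
  simp [List.filter]
  exact List.length_filter_le _ _

def get_client_ips_alt (clients : List (List (String × String))) : List (String × Int) :=
  let ips := clients.map pvIp
  (PySem.Dict.mk (tallyLoop ips [])).items

-- ===== PRECONDITION & SPEC =====
-- Pre_ excludes exactly the inputs where A raises KeyError: a client dict without the key 'addr'.
def Pre_get_client_ips (clients : List (List (String × String))) : Prop :=
  ∀ c ∈ clients, (PySem.Dict.mk c).contains "addr" = true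
instance (clients : List (List (String × String))) : Decidable (Pre_get_client_ips clients) := by unfold Pre_get_client_ips; infer_instance
def pvWitness_get_client_ips : (List (List (String × String))) := [[("addr", "1.2.3.4:80")]]

def Spec_get_client_ips (clients : List (List (String × String))) (out : List (String × Int)) : Prop := out = get_client_ips_alt clients
instance (clients : List (List (String × String))) (out : List (String × Int)) : Decidable (Spec_get_client_ips clients out) := by unfold Spec_get_client_ips; infer_instance

-- ===== CLAIM (what is proved, stated in full; the proofs are below) =====
def Claim_equal_get_client_ips : Prop := ∀ (clients : List (List (String × String))), Dom_get_client_ips clients → Pre_get_client_ips clients → Spec_get_client_ips clients (get_client_ips clients)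

-- ===== LEMMAS AND PROOFS =====
-- A's loop body is exactly the Counter step: 'insert ip 1' on a fresh key is 'insert ip (getD ip 0 + 1)'.
lemma pv_body_eq :
    (fun (d : PySem.Dict String Int) ip =>
        if d.contains ip then d.insert ip (d.getD ip 0 + 1) else d.insert ip 1)
      = fun (d : PySem.Dict String Int) ip => d.insert ip (d.getD ip 0 + 1) := by
  funext d ip
  by_cases h : d.contains ip = true
  · simp [h]
  · have h' : d.contains ip = false := by simpa using h
    rw [PySem.Dict.getD_of_not_contains d 0 h']
    simp [h']

-- discarding a from (add s a) is the same as discarding a from s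
lemma pv_discard_add_self (s : PySem.Set String) (a : String) :
    (s.add a).discard a = s.discard a := by
  unfold PySem.Set.add PySem.Set.discard
  by_cases h : s.contains a = true
  · simp only [h, if_true]
  · have h' : s.contains a = false := by simpa using h
    simp only [h', Bool.false_eq_true, if_false, List.filter_append]
    simp

-- for x ≠ a, adding x commutes with discarding a
lemma pv_discard_add_ne (s : PySem.Set String) (a x : String) (hx : x ≠ a) :
    (s.add x).discard a = (s.discard a).add x := by
  unfold PySem.Set.add PySem.Set.discard
  by_cases h : x ∈ s
  · have h1 : PySem.Set.contains s x = true := (PySem.Set.contains_iff s x).mpr h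
    have h2 : PySem.Set.contains (List.filter (fun y => !y == a) s) x = true :=
      (PySem.Set.contains_iff _ x).mpr (List.mem_filter.mpr ⟨h, by simp [hx]⟩)
    simp only [h1, h2, if_true]
  · have h1 : PySem.Set.contains s x = false :=
      Bool.eq_false_iff.mpr (fun hc => h ((PySem.Set.contains_iff s x).mp hc))
    have h2 : PySem.Set.contains (List.filter (fun y => !y == a) s) x = false :=
      Bool.eq_false_iff.mpr
        (fun hc => h ((List.mem_filter.mp ((PySem.Set.contains_iff _ x).mp hc)).1))
    simp only [h1, h2, Bool.false_eq_true, if_false, List.filter_append]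
    simp [hx]

-- ofList of the a-free filter is discard a of ofList
lemma pv_foldl_filter (a : String) (t : List String) :
    ∀ s : PySem.Set String,
      (t.filter (fun x => x != a)).foldl PySem.Set.add (s.discard a)
        = (t.foldl PySem.Set.add s).discard a := by
  induction t with
  | nil => intro s; rfl
  | cons x t ih =>
    intro s
    by_cases hx : x = a
    · subst hx
      rw [List.filter_cons_of_neg (by simp), List.foldl_cons, ← ih (s.add x),
        pv_discard_add_self]
    · rw [List.filter_cons_of_pos (by simp [hx]), List.foldl_cons, List.foldl_cons,
        ← ih (s.add x), pv_discard_add_ne s a x hx]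

lemma pv_ofList_filter (a : String) (t : List String) :
    PySem.Set.ofList (t.filter (fun x => x != a)) = (PySem.Set.ofList t).discard a := by
  have h := pv_foldl_filter a t PySem.Set.empty
  simpa [PySem.Set.ofList, PySem.Set.empty, PySem.Set.discard] using h

-- countP of a predicate and its negation partition the length
lemma pv_countP_not {α : Type} (p : α → Bool) (l : List α) :
    l.countP p + l.countP (fun x => !p x) = l.length := by
  induction l with
  | nil => rfl
  | cons x t ih => by_cases h : p x = true <;> simp [h] <;> omega

-- the partition-refinement loop returns the first-occurrence counts list
lemma pv_tallyLoop_eq :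
    ∀ (n : Nat) (xs : List String), xs.length ≤ n → ∀ pairs,
      tallyLoop xs pairs
        = pairs ++ (PySem.Set.ofList xs).map (fun k => (k, (List.count k xs : Int))) := by
  intro n
  induction n with
  | zero =>
    intro xs hl pairs
    have : xs = [] := List.eq_nil_of_length_eq_zero (Nat.le_zero.mp hl)
    subst this
    unfold tallyLoop; simp [PySem.Set.ofList]
  | succ n ih =>
    intro xs hl pairs
    match xs with
    | [] => unfold tallyLoop; simp [PySem.Set.ofList]
    | a :: t =>
      unfold tallyLoop
      simp only []
      have hrest : (a :: t).filter (fun x => x != a) = t.filter (fun x => x != a) := by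
        simp
      have hlen : (t.filter (fun x => x != a)).length ≤ n := by
        have h5 := List.length_filter_le (fun x => x != a) t
        have ht : t.length + 1 ≤ n + 1 := by simpa using hl
        omega
      rw [hrest, ih _ hlen, List.append_assoc]
      congr 1
      have hcnt : ((a :: t).length : Int) - ((t.filter (fun x => x != a)).length : Int)
          = (List.count a (a :: t) : Int) := by
        have h1 : (t.filter (fun x => x != a)).length = t.countP (fun x => x != a) :=
          List.countP_eq_length_filter.symm
        have h2 : t.countP (fun x => x != a) + t.countP (fun x => !(x != a)) = t.length :=
          pv_countP_not _ _
        have h3 : t.countP (fun x => !(x != a)) = List.count a t := by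
          simp only [List.count]
          apply List.countP_congr
          intro x _
          simp [bne]
        have h4 : List.count a (a :: t) = List.count a t + 1 := by simp
        rw [h1, h4, List.length_cons]
        push_cast
        omega
      rw [pv_ofList_filter, PySem.Set.ofList_cons]
      simp only [List.map_cons, List.singleton_append]
      congr 1
      · rw [hcnt]
      · apply List.map_congr_left
        intro k hk
        have hkne : k ≠ a := ((PySem.Set.mem_discard _ _ _).mp hk).2
        have hkne' : ¬(a = k) := fun h => hkne h.symm
        have hc : List.count k (t.filter (fun x => x != a)) = List.count k (a :: t) := by
          rw [List.count_filter (by simp [hkne])]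
          simp [hkne']
        rw [hc]

-- ===== VERDICT (by name: the statement is the Claim_ definition above) =====
theorem get_client_ips_spec : Claim_equal_get_client_ips := by
  intro clients _ _
  show get_client_ips clients = get_client_ips_alt clients
  unfold get_client_ips get_client_ips_alt
  have h1 : List.foldl
      (fun (ips : PySem.Dict String Int) client =>
        let ip := pvIp client
        if ips.contains ip then ips.insert ip (ips.getD ip 0 + 1) else ips.insert ip 1)
      PySem.Dict.empty clients
      = PySem.Dict.counter (clients.map pvIp) := by
    rw [← PySem.Dict.foldl_insert_getD_add_one_eq_counter, List.foldl_map]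
    congr 1
    funext d c
    simpa using congrFun (congrFun pv_body_eq d) (pvIp c)
  rw [h1, PySem.Dict.items_counter]
  have h2 := pv_tallyLoop_eq (clients.map pvIp).length (clients.map pvIp) (Nat.le_refl _) []
  simp [h2]
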